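-- pv_equiv track=rewrite | github.com/apache/systemds | src/main/python/generator/dml_parser.py | parse_input_output_string
-- ===== SOURCE A (Python) =====
-- def parse_input_output_string(data: str):
--     """
--         parse the data into a list of tuples containing
--         a parameter and a description
--     """
--     ret = []
--     for line in data.split("\n"):
--         if line:
--             if line[1] == " ":
--                 prev = ret[-1]
--                 n = (prev[0], prev[1] +"\n        " + line.strip())
--                 ret[-1] = n
--                 # ret[-1][1] += line.strip()
--             else:
--                 vd = line.split("  ", 1)
--                 ret.append((vd[0].strip(),vd[1].strip()))
--
--     return ret
-- ===== SOURCE B (Python) =====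
-- def parse_input_output_string(data: str):
--     """
--         parse the data into a list of tuples containing
--         a parameter and a description
--     """
--     lines = [line for line in data.split("\n") if line]
--     ret = []
--     i = 0
--     n = len(lines)
--     while i < n:
--         # the block of continuation lines following the header at i
--         j = i + 1
--         while j < n and lines[j][1] == " ":
--             j += 1
--         vd = lines[i].split("  ", 1)
--         desc = "\n        ".join([vd[1].strip()] + [lines[k].strip() for k in range(i + 1, j)])
--         ret.append((vd[0].strip(), desc))
--         i = j
--     return ret
-- ===== Notes on version B (the rewrite author's own statement) =====
-- stated objective: alternative
-- what changed: A is a single fold that rewrites the last tuple of the result on every continuation line; B first drops empty lines, then consumes the line list block-by-block: for each header it scans ahead over its whole continuation block (inner while), builds the description with one join, and jumps to the next header. Pre_ excludes exactly the inputs where A raises IndexError (a non-empty line shorter than 2 chars, a leading continuation line, or a header without the ' ' separator).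
-- outside the precondition, e.g. on parse_input_output_string('  '): A raises IndexError, B returns [('', '')]
import Mathlib
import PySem

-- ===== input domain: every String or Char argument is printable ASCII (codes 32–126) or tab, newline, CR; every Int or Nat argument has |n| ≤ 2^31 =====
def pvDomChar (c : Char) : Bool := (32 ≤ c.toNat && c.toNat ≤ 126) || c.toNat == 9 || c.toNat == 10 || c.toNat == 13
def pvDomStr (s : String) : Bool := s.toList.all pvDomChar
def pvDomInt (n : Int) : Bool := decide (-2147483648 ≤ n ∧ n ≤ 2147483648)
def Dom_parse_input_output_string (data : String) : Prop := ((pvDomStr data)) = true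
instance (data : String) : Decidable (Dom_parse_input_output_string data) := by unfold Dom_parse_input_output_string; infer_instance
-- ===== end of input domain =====

-- B re-implements the parse block-by-block (consume a header, scan its whole continuation block,
-- emit one tuple) instead of A's fold that rewrites the last tuple per line (objective: alternative).

-- ===== PORT A =====
-- data.split("\n") (the separator "\n" is non-empty, so split? is never none and getD is exact)
def pvLines (data : String) : List String := (PySem.Str.split? data "\n").getD []

-- one iteration of A's single loop over the lines
def pvStepA (ret : List (String × String)) (line : String) : List (String × String) :=
  if line = "" then ret
  else
    match PySem.Str.pyGet? line 1 with
    | some c =>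
      if c = ' ' then
        match ret.getLast? with
        | some prev => ret.dropLast ++ [(prev.1, PySem.Str.join "" [prev.2, "\n        ", PySem.Str.strip line])]
        | none => ret   -- Python: IndexError (ret[-1] on empty list); excluded by Pre_
      else
        match PySem.Str.splitMax? line "  " 1 with
        | some (v :: d :: _) => ret ++ [(PySem.Str.strip v, PySem.Str.strip d)]
        | _ => ret      -- Python: IndexError (vd[1] when '  ' absent); excluded by Pre_
    | none => ret       -- Python: IndexError (line[1] on a 1-char line); excluded by Pre_

def parse_input_output_string (data : String) : List (String × String) :=
  (pvLines data).foldl pvStepA []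

-- ===== PORT B =====
-- lines[j][1] == " " : is this line a continuation line? (short line: IndexError, excluded by Pre_)
def pvIsCont (l : String) : Bool := PySem.Str.pyGet? l 1 == some ' '

-- the outer while loop of B: one iteration per block (header + its continuation lines);
-- the inner while loop is the takeWhile/dropWhile scan over the continuation block
def pvBlocks (ls : List String) : List (String × String) :=
  match ls with
  | [] => []
  | h :: rest =>
    let conts := rest.takeWhile pvIsCont
    let entry :=
      match PySem.Str.splitMax? h "  " 1 with
      | some (v :: d :: _) =>
          (PySem.Str.strip v,
           PySem.Str.join "\n        " (PySem.Str.strip d :: conts.map PySem.Str.strip))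
      | _ => ("", "")   -- Python: IndexError (vd[1]); excluded by Pre_
    entry :: pvBlocks (rest.dropWhile pvIsCont)
termination_by ls.length
decreasing_by
  simpa using Nat.lt_succ_of_le (List.length_dropWhile_le pvIsCont rest)

def parse_input_output_string_alt (data : String) : List (String × String) :=
  pvBlocks (((PySem.Str.split? data "\n").getD []).filter (fun l => l ≠ ""))

-- ===== PRECONDITION & SPEC =====
-- Pre_ = exactly the inputs where A raises no IndexError: every non-empty line has at least 2
-- characters; a line whose 2nd char is not a space (a header) contains the '  ' separator; and
-- the first non-empty line is a header (otherwise ret[-1] is read from an empty list).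
def Pre_parse_input_output_string (data : String) : Prop :=
  (∀ l ∈ (((PySem.Str.split? data "\n").getD []).filter (fun l => l ≠ "")),
      1 < l.toList.length ∧
      (PySem.Str.pyGet? l 1 ≠ some ' ' →
        2 ≤ ((PySem.Str.splitMax? l "  " 1).getD []).length)) ∧
  (∀ h ∈ (((PySem.Str.split? data "\n").getD []).filter (fun l => l ≠ "")).head?,
      PySem.Str.pyGet? h 1 ≠ some ' ')

instance (data : String) : Decidable (Pre_parse_input_output_string data) := by
  unfold Pre_parse_input_output_string; infer_instance

def pvWitness_parse_input_output_string : String := "ab  cd\n  more\nx2  y"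

def Spec_parse_input_output_string (data : String) (out : List (String × String)) : Prop := out = parse_input_output_string_alt data
instance (data : String) (out : List (String × String)) : Decidable (Spec_parse_input_output_string data out) := by unfold Spec_parse_input_output_string; infer_instance

-- ===== CLAIM (what is proved, stated in full; the proofs are below) =====
def Claim_equal_parse_input_output_string : Prop := ∀ (data : String), Dom_parse_input_output_string data → Pre_parse_input_output_string data → Spec_parse_input_output_string data (parse_input_output_string data)

-- ===== LEMMAS AND PROOFS =====

-- A's fold ignores empty lines
lemma pvFoldA_filter (ls : List String) (acc : List (String × String)) :
    ls.foldl pvStepA acc = (ls.filter (fun l => l ≠ "")).foldl pvStepA acc := by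
  induction ls generalizing acc with
  | nil => rfl
  | cons l ls ih =>
    by_cases hl : l = ""
    · subst hl; simpa [pvStepA] using ih acc
    · simp only [List.filter_cons, List.foldl_cons]
      rw [if_pos (by simpa using hl)]
      exact ih _

-- A's per-continuation concatenation is B's single join
-- a string fact used by pvJoin_foldl (specific to these two programs' joiner)
lemma pvCharsJoinStep (S X C : List Char) (cs : List (List Char)) :
    PySem.Chars.join S ((X ++ S ++ C) :: cs) = PySem.Chars.join S (X :: C :: cs) := by
  cases cs with
  | nil => simp [PySem.Chars.join_singleton, PySem.Chars.join_cons_cons]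
  | cons c' cs' =>
    rw [PySem.Chars.join_cons_cons, PySem.Chars.join_cons_cons, PySem.Chars.join_cons_cons]
    simp [List.append_assoc]

-- A's per-continuation concatenation is B's single join
lemma pvJoin_foldl (cs : List String) (x : String) :
    cs.foldl (fun s c => PySem.Str.join "" [s, "\n        ", c]) x =
      PySem.Str.join "\n        " (x :: cs) := by
  induction cs generalizing x with
  | nil =>
    apply String.toList_inj.mp
    simp [PySem.Str.toList_join, PySem.Chars.join_singleton]
  | cons c cs ih =>
    rw [List.foldl_cons, ih]
    apply String.toList_inj.mp
    rw [PySem.Str.toList_join, PySem.Str.toList_join]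
    have h1 : (PySem.Str.join "" [x, "\n        ", c]).toList
        = x.toList ++ ("\n        " : String).toList ++ c.toList := by
      rw [PySem.Str.toList_join]
      simp [PySem.Chars.join, List.intercalate]
    simp only [List.map_cons, h1]
    exact pvCharsJoinStep _ _ _ _

-- folding A's step over a block of continuation lines only rewrites the last tuple
lemma pvChunk (cs : List String) (acc : List (String × String)) (p q : String)
    (hc : ∀ c ∈ cs, pvIsCont c = true) :
    cs.foldl pvStepA (acc ++ [(p, q)]) =
      acc ++ [(p, cs.foldl (fun s c => PySem.Str.join "" [s, "\n        ", PySem.Str.strip c]) q)] := by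
  induction cs generalizing q with
  | nil => rfl
  | cons c cs ih =>
    have hcont : PySem.List.pyGet? c.toList 1 = some ' ' := by
      have := hc c (by simp)
      simpa [pvIsCont] using this
    have hne : c ≠ "" := by
      intro h; subst h
      exact absurd hcont (by decide)
    have hstep : pvStepA (acc ++ [(p, q)]) c =
        acc ++ [(p, PySem.Str.join "" [q, "\n        ", PySem.Str.strip c])] := by
      simp [pvStepA, hne, hcont]
    simp only [List.foldl_cons, hstep]
    exact ih _ (fun c' hc' => hc c' (by simp [hc']))

-- main induction, following B's block recursion
lemma pvMain (ls : List String) (acc : List (String × String))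
    (hg : ∀ l ∈ ls, 1 < l.toList.length ∧
        (pvIsCont l = false → 2 ≤ ((PySem.Str.splitMax? l "  " 1).getD []).length))
    (hh : ∀ h ∈ ls.head?, pvIsCont h = false) :
    ls.foldl pvStepA acc = acc ++ pvBlocks ls := by
  induction ls using pvBlocks.induct generalizing acc with
  | case1 => simp [pvBlocks]
  | case2 h rest ih =>
    have hhd : pvIsCont h = false := hh h (by simp)
    obtain ⟨hlen, hsplit⟩ := hg h (by simp)
    have hne : h ≠ "" := by
      intro he; subst he; simp at hlen
    have hget : PySem.List.pyGet? h.toList 1 = some h.toList[1] := by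
      simpa using PySem.List.pyGet?_ofNat h.toList 1 hlen
    have hhdL : PySem.List.pyGet? h.toList 1 ≠ some ' ' := by
      simpa [pvIsCont] using hhd
    have hsp : h.toList[1] ≠ ' ' := by
      intro he
      rw [he] at hget
      exact hhdL hget
    obtain ⟨v, d, rst, hvd⟩ : ∃ v d rst, PySem.Str.splitMax? h "  " 1 = some (v :: d :: rst) := by
      have h2 := hsplit hhd
      rcases hs : PySem.Str.splitMax? h "  " 1 with _ | pieces
      · simp [hs] at h2
      · rcases pieces with _ | ⟨v, _ | ⟨d, rst⟩⟩
        · simp [hs] at h2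
        · simp [hs] at h2
        · exact ⟨v, d, rst, rfl⟩
    have hstep : pvStepA acc h = acc ++ [(PySem.Str.strip v, PySem.Str.strip d)] := by
      simp [pvStepA, hne, hget, hsp, hvd]
    have hrest : rest = rest.takeWhile pvIsCont ++ rest.dropWhile pvIsCont :=
      (List.takeWhile_append_dropWhile).symm
    have hchunk := pvChunk (rest.takeWhile pvIsCont) acc (PySem.Str.strip v) (PySem.Str.strip d)
      (fun c hc => List.mem_takeWhile_imp hc)
    have hjoin : (rest.takeWhile pvIsCont).foldl
          (fun s c => PySem.Str.join "" [s, "\n        ", PySem.Str.strip c]) (PySem.Str.strip d)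
        = PySem.Str.join "\n        "
            (PySem.Str.strip d :: (rest.takeWhile pvIsCont).map PySem.Str.strip) := by
      rw [← List.foldl_map (f := PySem.Str.strip)
            (g := fun s c => PySem.Str.join "" [s, "\n        ", c])]
      exact pvJoin_foldl _ _
    have hIH := ih (acc ++ [(PySem.Str.strip v,
        PySem.Str.join "\n        " (PySem.Str.strip d :: (rest.takeWhile pvIsCont).map PySem.Str.strip))])
      (fun l hl => hg l (by
        have : l ∈ rest := (List.dropWhile_sublist pvIsCont).mem hl
        simp [this]))
      (fun h' hh' => by
        have hne' : rest.dropWhile pvIsCont ≠ [] := by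
          intro he; rw [he] at hh'; simp at hh'
        have h1 := List.head_dropWhile_not (p := pvIsCont) (l := rest) hne'
        have h2 : (rest.dropWhile pvIsCont).head hne' = h' := by
          rw [← Option.some_inj, ← List.head?_eq_some_head]; exact hh'
        rwa [h2] at h1)
    calc (h :: rest).foldl pvStepA acc
        = rest.foldl pvStepA (acc ++ [(PySem.Str.strip v, PySem.Str.strip d)]) := by
          rw [List.foldl_cons, hstep]
      _ = (rest.dropWhile pvIsCont).foldl pvStepA
            (acc ++ [(PySem.Str.strip v,
              PySem.Str.join "\n        " (PySem.Str.strip d :: (rest.takeWhile pvIsCont).map PySem.Str.strip))]) := by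
          conv_lhs => rw [hrest]
          rw [List.foldl_append, hchunk, hjoin]
      _ = acc ++ pvBlocks (h :: rest) := by
          rw [hIH]
          rw [show pvBlocks (h :: rest) =
              (match PySem.Str.splitMax? h "  " 1 with
               | some (v :: d :: _) =>
                   (PySem.Str.strip v,
                    PySem.Str.join "\n        " (PySem.Str.strip d :: ((rest.takeWhile pvIsCont).map PySem.Str.strip)))
               | _ => ("", ""))
              :: pvBlocks (rest.dropWhile pvIsCont) from by rw [pvBlocks]]
          simp [hvd]

-- ===== VERDICT (by name: the statement is the Claim_ definition above) =====
theorem parse_input_output_string_spec : Claim_equal_parse_input_output_string := by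
  intro data _ hpre
  obtain ⟨hg, hh⟩ := hpre
  unfold Spec_parse_input_output_string parse_input_output_string parse_input_output_string_alt
  rw [pvFoldA_filter]
  have := pvMain ((pvLines data).filter (fun l => l ≠ "")) []
    (fun l hl => by
      obtain ⟨h1, h2⟩ := hg l hl
      exact ⟨h1, fun hf => h2 (by simpa [pvIsCont] using hf)⟩)
    (fun h ht => by
      have := hh h ht
      simp only [pvIsCont, beq_eq_false_iff_ne, ne_eq]
      exact this)
  simpa [pvLines] using this
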